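-- pv_equiv track=rewrite | github.com/hamcoding9/DailyPractice | Programmers/괄호변환.py | make_right
-- ===== SOURCE A (Python) =====
-- from collections import deque
--
-- def split_uv(string):
--     u = ""
--     for i in range(len(string)):
--         u += string[i]
--         if is_balanced(u):
--             if len(u) == len(string):
--                 v = ""
--             else:
--                 v = string[i+1:]
--             return (u, v)
--
-- def is_balanced(string):
--     l = list(string)
--     return l.count("(") == l.count(")")
--
-- def is_right(string):
--     stack = deque()
--     for s in string:
--         if s == "(":
--             stack.append(s)
--         else:
--             if len(stack) <= 0:
--                 continue
--             stack.pop()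
--     return (len(stack) == 0)
--
-- def process_u(string):
--     u = ""
--     for i in range(1, len(string) - 1):
--         if string[i] == "(":
--             u += ")"
--         else:
--             u += "("
--     return u
--
-- def make_right(string):
--     if string == "":
--         return string
--     u, v = split_uv(string)
--     if is_right(u):
--         data = make_right(v)
--         return (u + data)
--     else:
--         data = "("
--         data += make_right(v)
--         data += ")"
--         data += process_u(u)
--         return data
-- ===== SOURCE B (Python) =====
-- def make_right(string):
--     pre = []
--     post = []
--     s = string
--     while s:
--         n = len(s)
--         bal = 0
--         k = n
--         for i in range(n):
--             c = s[i]
--             if c == '(':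
--                 bal += 1
--             elif c == ')':
--                 bal -= 1
--             if bal == 0:
--                 k = i + 1
--                 break
--         u, s = s[:k], s[k:]
--         d = 0
--         for c in u:
--             d = d + 1 if c == '(' else max(d - 1, 0)
--         if d == 0:
--             pre.append(u)
--         else:
--             pre.append('(')
--             post.append(')' + ''.join(')' if c == '(' else '(' for c in u[1:-1]))
--     return ''.join(pre) + ''.join(reversed(post))
-- ===== Notes on version B (the rewrite author's own statement) =====
-- stated objective: faster
-- what changed: A rescans the growing prefix with list().count on every character to find the balanced split and rebuilds strings char-by-char through recursion; B finds each split point in one pass with a running balance counter, checks correctness with a clamped depth counter instead of a deque, and builds the result iteratively with prefix/suffix accumulators joined once at the end.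
-- outside the precondition, e.g. on make_right('('): A raises TypeError, B returns '()'; on make_right(')'): A raises TypeError, B returns ')'
import Mathlib
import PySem

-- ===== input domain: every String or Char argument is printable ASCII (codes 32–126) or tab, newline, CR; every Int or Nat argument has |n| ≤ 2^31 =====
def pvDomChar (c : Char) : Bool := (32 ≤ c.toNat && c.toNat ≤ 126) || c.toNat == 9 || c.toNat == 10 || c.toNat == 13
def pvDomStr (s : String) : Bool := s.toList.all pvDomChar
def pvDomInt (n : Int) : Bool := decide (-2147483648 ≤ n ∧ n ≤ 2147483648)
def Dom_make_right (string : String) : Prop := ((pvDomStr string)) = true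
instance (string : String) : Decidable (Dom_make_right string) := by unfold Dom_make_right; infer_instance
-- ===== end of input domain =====

-- B replaces A's quadratic rescan-per-character balanced-prefix search and recursive string
-- rebuilding by a single-pass balance counter over indices and an iterative loop with
-- prefix/suffix accumulators (measurably faster).


-- ===== PORT A =====
-- is_balanced: list(string).count("(") == list(string).count(")")
def isBalancedA (s : List Char) : Bool := s.count '(' == s.count ')'

-- split_uv: grow u one char at a time, test is_balanced(u) each step; none = Python falls off
-- the loop and returns None (the caller's unpacking then raises TypeError).
def splitUVA (u rest : List Char) : Option (List Char × List Char) :=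
  match rest with
  | [] => none
  | c :: rs =>
    if isBalancedA (u ++ [c]) then some (u ++ [c], rs)
    else splitUVA (u ++ [c]) rs

-- is_right's deque stack: push '(' , otherwise pop unless empty
def stackStepA (st : List Char) (c : Char) : List Char :=
  if c = '(' then c :: st else match st with | [] => [] | _ :: t => t

def isRightA (s : List Char) : Bool := (s.foldl stackStepA []).isEmpty

-- process_u: for i in range(1, len-1): flip the char and append
def processUA (s : List Char) : List Char :=
  ((s.drop 1).dropLast).foldl (fun u c => u ++ [if c = '(' then ')' else '(']) []

theorem splitUVA_length :
    ∀ (rest u u' v : List Char), splitUVA u rest = some (u', v) → v.length < rest.length := by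
  intro rest
  induction rest with
  | nil => intro u u' v h; simp [splitUVA] at h
  | cons c rs ih =>
    intro u u' v h
    rw [splitUVA] at h
    by_cases hb : isBalancedA (u ++ [c]) = true
    · simp [hb] at h
      simp [← h.2]
    · simp [hb] at h
      have := ih (u ++ [c]) u' v h
      simp; omega

def makeRightA (s : List Char) : List Char :=
  if _h : s = [] then []
  else
    match hs : splitUVA [] s with
    | none => []   -- Python raises TypeError here; such inputs are excluded by Pre_make_right
    | some (u, v) =>
      if isRightA u then u ++ makeRightA v
      else '(' :: (makeRightA v ++ ')' :: processUA u)
termination_by s.length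
decreasing_by all_goals exact splitUVA_length s [] u v hs

def make_right (string : String) : String := String.ofList (makeRightA string.toList)

-- ===== PORT B =====
-- single-pass split search: running balance, returns the count of chars consumed up to the
-- first zero balance (the whole length if none)
def findSplitB (bal : Int) (rest : List Char) : Nat :=
  match rest with
  | [] => 0
  | c :: rs =>
    if (if c = '(' then bal + 1 else if c = ')' then bal - 1 else bal) = 0 then 1
    else 1 + findSplitB (if c = '(' then bal + 1 else if c = ')' then bal - 1 else bal) rs

-- the clamped depth d = d+1 / max(d-1,0); Nat subtraction is exactly Python's max(d-1,0)
def depthB (d : Nat) (s : List Char) : Nat :=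
  s.foldl (fun d c => if c = '(' then d + 1 else d - 1) d

-- ''.join(')' if c=='(' else '(' for c in u[1:-1])
def flipB (u : List Char) : List Char :=
  ((u.drop 1).dropLast).map (fun c => if c = '(' then ')' else '(')

theorem findSplitB_cons (bal : Int) (c : Char) (rs : List Char) :
    findSplitB bal (c :: rs) =
      if (if c = '(' then bal + 1 else if c = ')' then bal - 1 else bal) = 0 then 1
      else 1 + findSplitB (if c = '(' then bal + 1 else if c = ')' then bal - 1 else bal) rs := rfl

theorem findSplitB_pos (s : List Char) (h : s ≠ []) : 1 ≤ findSplitB 0 s := by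
  cases s with
  | nil => simp at h
  | cons c rs =>
    by_cases hb : (if c = '(' then (0:Int) + 1 else if c = ')' then 0 - 1 else 0) = 0
    · rw [findSplitB_cons, if_pos hb]
    · rw [findSplitB_cons, if_neg hb]; omega

-- the while-loop; pre is the joined prefix accumulator, post the stack of suffix segments
-- (Python appends and joins reversed(post); here the newest segment is consed in front and the
-- final join is flatten — the same value)
def loopB (pre : List Char) (post : List (List Char)) (s : List Char) : List Char :=
  if hnil : s = [] then pre ++ post.flatten
  else
    if depthB 0 (s.take (findSplitB 0 s)) = 0 then
      loopB (pre ++ s.take (findSplitB 0 s)) post (s.drop (findSplitB 0 s))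
    else
      loopB (pre ++ ['(']) ((')' :: flipB (s.take (findSplitB 0 s))) :: post)
        (s.drop (findSplitB 0 s))
termination_by s.length
decreasing_by
  all_goals
    have h1 := findSplitB_pos s hnil
    have h2 : 1 ≤ s.length := by cases s with | nil => simp at hnil | cons c rs => simp
    simp only [List.length_drop]
    omega

def make_right_alt (string : String) : String := String.ofList (loopB [] [] string.toList)

-- ===== PRECONDITION & SPEC =====
-- Pre_ admits exactly the strings with equally many '(' and ')': on every other (nonempty)
-- string A's split_uv eventually returns None and make_right raises TypeError.
def Pre_make_right (string : String) : Prop :=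
  string.toList.count '(' = string.toList.count ')'
instance (string : String) : Decidable (Pre_make_right string) := by
  unfold Pre_make_right; infer_instance

def pvWitness_make_right : String := "(()())"

def Spec_make_right (string : String) (out : String) : Prop := out = make_right_alt string
instance (string : String) (out : String) : Decidable (Spec_make_right string out) := by unfold Spec_make_right; infer_instance

-- ===== CLAIM (what is proved, stated in full; the proofs are below) =====
def Claim_equal_make_right : Prop := ∀ (string : String), Dom_make_right string → Pre_make_right string → Spec_make_right string (make_right string)

-- ===== LEMMAS AND PROOFS =====

-- the paren balance of a list
def balL (l : List Char) : Int := (l.count '(' : Int) - (l.count ')' : Int)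

theorem balL_nil : balL [] = 0 := by simp [balL]

theorem balL_append (u w : List Char) : balL (u ++ w) = balL u + balL w := by
  simp [balL, List.count_append]; ring

theorem isBalancedA_iff (u : List Char) : isBalancedA u = true ↔ balL u = 0 := by
  simp [isBalancedA, balL]; omega

theorem balL_single (c : Char) :
    balL [c] = (if c = '(' then (1:Int) else if c = ')' then -1 else 0) := by
  simp only [balL, List.count_singleton]
  by_cases h1 : c = '(' <;> by_cases h2 : c = ')' <;> simp_all

-- A's split and B's split-index search agree (and the found prefix is balanced)
theorem split_agree :
    ∀ (rest u : List Char), balL u + balL rest = 0 → rest ≠ [] →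
      splitUVA u rest =
        some (u ++ rest.take (findSplitB (balL u) rest), rest.drop (findSplitB (balL u) rest))
      ∧ balL (u ++ rest.take (findSplitB (balL u) rest)) = 0 := by
  intro rest
  induction rest with
  | nil => intro u _ h; simp at h
  | cons c rs ih =>
    intro u hbal _
    have hdelta : (if c = '(' then balL u + 1 else if c = ')' then balL u - 1 else balL u)
        = balL (u ++ [c]) := by
      rw [balL_append, balL_single]
      by_cases h1 : c = '(' <;> by_cases h2 : c = ')' <;> simp [h1, h2] <;> omega
    rw [splitUVA, findSplitB_cons, hdelta]
    by_cases hb : balL (u ++ [c]) = 0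
    · have hB : isBalancedA (u ++ [c]) = true := (isBalancedA_iff _).mpr hb
      simp [hB, hb, List.take_succ_cons, List.drop_succ_cons]
    · have hnb : ¬ isBalancedA (u ++ [c]) = true := by
        simp only [isBalancedA_iff]; exact hb
      have hbal' : balL (u ++ [c]) + balL rs = 0 := by
        have e1 : balL (c :: rs) = balL [c] + balL rs := by
          rw [show (c :: rs) = [c] ++ rs from rfl, balL_append]
        have e2 := balL_append u [c]
        omega
      have hrs : rs ≠ [] := by
        intro h; subst h; simp [balL_nil] at hbal'; exact hb hbal'
      have hih := ih (u ++ [c]) hbal' hrs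
      rw [if_neg hnb, if_neg hb]
      have hk : (1 + findSplitB (balL (u ++ [c])) rs) = findSplitB (balL (u ++ [c])) rs + 1 := by
        omega
      rw [hk]
      constructor
      · rw [hih.1]
        simp [List.take_succ_cons, List.drop_succ_cons]
      · have := hih.2
        simpa [List.take_succ_cons, List.append_assoc] using this

theorem depthB_cons (d : Nat) (c : Char) (cs : List Char) :
    depthB d (c :: cs) = depthB (if c = '(' then d + 1 else d - 1) cs := rfl

-- A's deque length equals B's clamped counter
theorem stack_len : ∀ (u : List Char) (st : List Char),
    (u.foldl stackStepA st).length = depthB st.length u := by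
  intro u
  induction u with
  | nil => intro st; simp [depthB]
  | cons c cs ih =>
    intro st
    rw [List.foldl_cons, depthB_cons, stackStepA.eq_def]
    by_cases hc : c = '('
    · rw [if_pos hc, if_pos hc, ih]
      simp
    · rw [if_neg hc, if_neg hc]
      cases st with
      | nil => rw [ih]; simp
      | cons a t => rw [ih]; simp

theorem isRightA_iff (u : List Char) : isRightA u = true ↔ depthB 0 u = 0 := by
  rw [isRightA, List.isEmpty_iff, ← List.length_eq_zero_iff, stack_len]
  simp

-- process_u's fold equals B's map
theorem foldl_append_map (f : Char → Char) :
    ∀ (l acc : List Char), l.foldl (fun u c => u ++ [f c]) acc = acc ++ l.map f := by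
  intro l
  induction l with
  | nil => simp
  | cons c cs ih => intro acc; simp [ih]

theorem processUA_eq_flipB (u : List Char) : processUA u = flipB u := by
  rw [processUA, flipB, foldl_append_map]; simp

-- loop invariant: loopB pre post s = pre ++ makeRightA s ++ post.flatten on balanced s
theorem loopB_invariant :
    ∀ (n : Nat) (s : List Char), s.length ≤ n → balL s = 0 →
    ∀ (pre : List Char) (post : List (List Char)),
      loopB pre post s = pre ++ makeRightA s ++ post.flatten := by
  intro n
  induction n with
  | zero =>
    intro s hs _ pre post
    have : s = [] := by cases s <;> simp_all
    subst this
    rw [loopB, makeRightA]; simp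
  | succ m ih =>
    intro s hs hbal pre post
    by_cases hnil : s = []
    · subst hnil; rw [loopB, makeRightA]; simp
    · have hsplit := split_agree s [] (by simpa [balL_nil] using hbal) hnil
      simp only [List.nil_append, balL_nil] at hsplit
      set k := findSplitB 0 s with hk
      have hA : splitUVA [] s = some (s.take k, s.drop k) := hsplit.1
      have hbu : balL (s.take k) = 0 := hsplit.2
      have hbv : balL (s.drop k) = 0 := by
        have := balL_append (s.take k) (s.drop k)
        rw [List.take_append_drop] at this
        omega
      have hk1 : 1 ≤ k := hk ▸ findSplitB_pos s hnil
      have hvlen : (s.drop k).length ≤ m := by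
        simp only [List.length_drop]
        have : 1 ≤ s.length := by cases s with | nil => simp at hnil | cons a b => simp
        omega
      have hmkA : makeRightA s =
          if isRightA (s.take k) then s.take k ++ makeRightA (s.drop k)
          else '(' :: (makeRightA (s.drop k) ++ ')' :: processUA (s.take k)) := by
        conv_lhs => rw [makeRightA]
        rw [dif_neg hnil]
        split
        · rename_i heq; rw [hA] at heq; cases heq
        · rename_i u v heq; rw [hA] at heq; cases heq; rfl
      rw [loopB, dif_neg hnil, ← hk]
      by_cases hd : depthB 0 (s.take k) = 0
      · have hr : isRightA (s.take k) = true := (isRightA_iff _).mpr hd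
        rw [if_pos hd, ih (s.drop k) hvlen hbv, hmkA, if_pos hr]
        simp
      · have hr : ¬ isRightA (s.take k) = true := by
          rw [isRightA_iff]; exact hd
        rw [if_neg hd, ih (s.drop k) hvlen hbv, hmkA, if_neg hr, processUA_eq_flipB]
        simp

theorem main_eq (s : List Char) (h : balL s = 0) : loopB [] [] s = makeRightA s := by
  have := loopB_invariant s.length s le_rfl h [] []
  simpa using this

-- ===== VERDICT (by name: the statement is the Claim_ definition above) =====
theorem make_right_spec : Claim_equal_make_right := by
  intro s _ hpre
  unfold Spec_make_right make_right make_right_alt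
  rw [main_eq]
  unfold Pre_make_right at hpre
  simp [balL, hpre]
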